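-- pv_equiv track=rewrite | github.com/Tigter/hyper-enz | baselines/subgraph_set_drnl.py | bfs_k_hop_from_set
-- ===== SOURCE A (Python) =====
-- from typing import List, Dict, Tuple
--
-- def bfs_k_hop_from_set(adj: Dict[int, List[int]], sources: List[int], k: int) -> List[int]:
--     from collections import deque
--     visited = set(sources)
--     q = deque([(s, 0) for s in sources])
--     while q:
--         u, d = q.popleft()
--         if d == k:
--             continue
--         for v in adj.get(u, []):
--             if v not in visited:
--                 visited.add(v)
--                 q.append((v, d + 1))
--     return sorted(visited)
-- ===== SOURCE B (Python) =====
-- from typing import List, Dict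
--
-- def bfs_k_hop_from_set(adj: Dict[int, List[int]], sources: List[int], k: int) -> List[int]:
--     # Fixpoint iteration: repeatedly close the whole reached set under one
--     # adjacency step, up to k rounds or until it stops growing.
--     reach = set(sources)
--     d = 0
--     while d != k:
--         new = reach | {v for u in reach for v in adj.get(u, [])}
--         if new == reach:
--             break
--         reach = new
--         d += 1
--     return sorted(reach)
-- ===== Notes on version B (the rewrite author's own statement) =====
-- stated objective: alternative
-- what changed: Replaces the distance-tagged BFS queue with fixpoint iteration on the reached set: each round unions the whole current set with the neighbours of all its members (no frontier/queue, no per-node distances), stopping after k rounds or when the set stops growing.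
import Mathlib
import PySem

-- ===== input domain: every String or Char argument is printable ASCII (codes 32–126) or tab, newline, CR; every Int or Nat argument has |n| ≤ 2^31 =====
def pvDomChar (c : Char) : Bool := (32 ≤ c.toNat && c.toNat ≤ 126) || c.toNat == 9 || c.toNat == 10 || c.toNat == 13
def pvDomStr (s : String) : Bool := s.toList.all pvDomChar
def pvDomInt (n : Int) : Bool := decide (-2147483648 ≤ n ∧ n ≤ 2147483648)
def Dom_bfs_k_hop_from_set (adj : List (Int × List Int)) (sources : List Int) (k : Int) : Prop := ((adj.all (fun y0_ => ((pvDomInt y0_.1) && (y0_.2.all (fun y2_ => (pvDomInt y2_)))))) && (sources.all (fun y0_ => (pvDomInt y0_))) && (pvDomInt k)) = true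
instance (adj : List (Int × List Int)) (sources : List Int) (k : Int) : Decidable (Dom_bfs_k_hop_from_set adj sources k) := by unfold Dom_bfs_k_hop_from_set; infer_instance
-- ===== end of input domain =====

-- B replaces A's distance-tagged BFS queue by fixpoint iteration on the reached SET:
-- each round unions the whole current set with the neighbours of all its members, up to
-- k rounds or until the set stops growing (no queue, no frontier, no per-node distances);
-- objective: alternative algorithm, equivalence proved on all inputs.
-- Both loops carry a Nat fuel solely as a structural totality guard; the initial fuel
-- strictly exceeds the loop's step count, so it is never exhausted (proved below:
-- the equivalence theorem covers every input).

-- ===== PORT A =====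
def bfs_k_hop_from_set_loop (adj : List (Int × List Int)) (k : Int) :
    Nat → List (Int × Int) → PySem.Set Int → List Int
  | 0, _, visited => PySem.List.sorted visited (fun x => x) false
  | _ + 1, [], visited => PySem.List.sorted visited (fun x => x) false
  | fuel + 1, (u, d) :: rest, visited =>
    if d = k then
      bfs_k_hop_from_set_loop adj k fuel rest visited
    else
      let st := (PySem.Dict.getD ⟨adj⟩ u []).foldl
        (fun st v => if PySem.Set.contains st.1 v then st
          else (PySem.Set.add st.1 v, st.2 ++ [(v, d + 1)])) (visited, rest)
      bfs_k_hop_from_set_loop adj k fuel st.2 st.1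

def bfs_k_hop_from_set (adj : List (Int × List Int)) (sources : List Int) (k : Int) : List Int :=
  bfs_k_hop_from_set_loop adj k ((adj.flatMap (fun p => p.2)).length + sources.length + 1)
    (sources.map (fun s => (s, 0))) (PySem.Set.ofList sources)

-- ===== PORT B =====
-- reach | {v for u in reach for v in adj.get(u, [])}
def bfs_k_hop_from_set_alt_close (adj : List (Int × List Int)) (reach : PySem.Set Int) :
    PySem.Set Int :=
  PySem.Set.union reach (reach.flatMap (fun u => PySem.Dict.getD ⟨adj⟩ u []))

def bfs_k_hop_from_set_alt_loop (adj : List (Int × List Int)) (k : Int) :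
    Nat → PySem.Set Int → Int → List Int
  | 0, reach, _ => PySem.List.sorted reach (fun x => x) false
  | fuel + 1, reach, d =>
    if d = k then PySem.List.sorted reach (fun x => x) false
    else
      let nw := bfs_k_hop_from_set_alt_close adj reach
      if PySem.Set.equal nw reach then PySem.List.sorted reach (fun x => x) false
      else bfs_k_hop_from_set_alt_loop adj k fuel nw (d + 1)

def bfs_k_hop_from_set_alt (adj : List (Int × List Int)) (sources : List Int) (k : Int) : List Int :=
  bfs_k_hop_from_set_alt_loop adj k ((adj.flatMap (fun p => p.2)).length + 1)
    (PySem.Set.ofList sources) 0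

-- ===== PRECONDITION & SPEC =====
def Spec_bfs_k_hop_from_set (adj : List (Int × List Int)) (sources : List Int) (k : Int) (out : List Int) : Prop := out = bfs_k_hop_from_set_alt adj sources k
instance (adj : List (Int × List Int)) (sources : List Int) (k : Int) (out : List Int) : Decidable (Spec_bfs_k_hop_from_set adj sources k out) := by unfold Spec_bfs_k_hop_from_set; infer_instance

-- ===== CLAIM (what is proved, stated in full; the proofs are below) =====
def Claim_equal_bfs_k_hop_from_set : Prop := ∀ (adj : List (Int × List Int)) (sources : List Int) (k : Int), Dom_bfs_k_hop_from_set adj sources k → Spec_bfs_k_hop_from_set adj sources k (bfs_k_hop_from_set adj sources k)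

-- ===== LEMMAS AND PROOFS =====

-- Proof device: level-synchronised BFS, the common refinement of A's queue and B's fixpoint.
def pvLevelExpand (adj : List (Int × List Int))
    (frontier : List Int) (visited : PySem.Set Int) : PySem.Set Int × List Int :=
  frontier.foldl (fun st u =>
    (PySem.Dict.getD ⟨adj⟩ u []).foldl
      (fun st v => if PySem.Set.contains st.1 v then st
        else (PySem.Set.add st.1 v, st.2 ++ [v])) st) (visited, ([] : List Int))

def pvLevelLoop (adj : List (Int × List Int)) (k : Int) :
    Nat → List Int → PySem.Set Int → Int → List Int
  | 0, _, visited, _ => PySem.List.sorted visited (fun x => x) false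
  | fuel + 1, frontier, visited, d =>
    if frontier = [] ∨ d = k then
      PySem.List.sorted visited (fun x => x) false
    else
      let st := pvLevelExpand adj frontier visited
      pvLevelLoop adj k fuel st.2 st.1 (d + 1)

-- Measure: how many listed neighbour entries are not yet visited (all loops add only such nodes).
def pvUniv (adj : List (Int × List Int)) : List Int := adj.flatMap (fun p => p.2)

def pvUnseen (adj : List (Int × List Int)) (vis : List Int) : Nat :=
  ((pvUniv adj).filter (fun x => !(vis.contains x))).length

theorem pvUnseen_le_univ (adj : List (Int × List Int)) (vis : List Int) :
    pvUnseen adj vis ≤ (pvUniv adj).length :=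
  List.length_filter_le _ _

theorem pvGetD_subset_univ (adj : List (Int × List Int)) (u : Int) :
    ∀ v ∈ PySem.Dict.getD ⟨adj⟩ u [], v ∈ pvUniv adj := by
  intro v hv
  unfold PySem.Dict.getD PySem.Dict.get? at hv
  cases hfind : List.find? (fun p => p.1 == u) (⟨adj⟩ : PySem.Dict Int (List Int)).items with
  | none => simp [hfind] at hv
  | some p =>
    have hmem : p ∈ adj := List.mem_of_find?_eq_some hfind
    simp only [hfind, Option.map_some, Option.getD_some] at hv
    simp only [pvUniv, List.mem_flatMap]
    exact ⟨p, hmem, hv⟩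

theorem pvUnseen_add_lt (adj : List (Int × List Int)) (vis : List Int) (v : Int)
    (hU : v ∈ pvUniv adj) (hv : v ∉ vis) :
    pvUnseen adj (vis ++ [v]) < pvUnseen adj vis := by
  unfold pvUnseen
  have hpt : ∀ x, (!((vis ++ [v]).contains x)) = ((!(x == v)) && !(vis.contains x)) := by
    intro x
    by_cases hx : x = v <;> simp [hx]
  have hsplit : (pvUniv adj).filter (fun x => !((vis ++ [v]).contains x))
      = ((pvUniv adj).filter (fun x => !(vis.contains x))).filter (fun x => !(x == v)) := by
    rw [List.filter_filter]
    exact List.filter_congr (fun x _ => hpt x)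
  rw [hsplit]
  apply List.length_filter_lt_length_iff_exists.mpr
  refine ⟨v, List.mem_filter.mpr ⟨hU, by simpa using hv⟩, by simp⟩

-- pvUnseen depends only on the member set.
theorem pvUnseen_congr (adj : List (Int × List Int)) (a b : List Int)
    (h : ∀ x, x ∈ a ↔ x ∈ b) : pvUnseen adj a = pvUnseen adj b := by
  unfold pvUnseen
  congr 1
  apply List.filter_congr
  intro x _
  by_cases hx : x ∈ a
  · simp [hx, (h x).mp hx]
  · have hb : x ∉ b := fun hb => hx ((h x).mpr hb)
    simp [hx, hb]

-- A strictly larger member set (inside the universe) has strictly fewer unseen entries.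
theorem pvUnseen_lt_of_ssub (adj : List (Int × List Int)) (a b : List Int)
    (hsub : ∀ x ∈ a, x ∈ b) (w : Int) (hwU : w ∈ pvUniv adj) (hwb : w ∈ b) (hwa : w ∉ a) :
    pvUnseen adj b < pvUnseen adj a := by
  unfold pvUnseen
  have himp : ∀ x, (!(b.contains x)) = true → (!(a.contains x)) = true := by
    intro x hx
    simp only [Bool.not_eq_true', List.contains_eq_mem, decide_eq_false_iff_not] at hx ⊢
    exact fun ha => hx (hsub x ha)
  have hsplit : (pvUniv adj).filter (fun x => !(b.contains x))
      = ((pvUniv adj).filter (fun x => !(a.contains x))).filter (fun x => !(b.contains x)) := by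
    rw [List.filter_filter]
    apply List.filter_congr
    intro x _
    by_cases hxb : x ∈ b
    · simp [hxb]
    · have hxa : x ∉ a := fun h => hxb (hsub x h)
      simp [hxb, hxa]
  rw [hsplit]
  apply List.length_filter_lt_length_iff_exists.mpr
  refine ⟨w, List.mem_filter.mpr ⟨hwU, by simpa using hwa⟩, by simpa using hwb⟩

-- Bound on the inner neighbour fold, payload-generic.
theorem pvFold_bound {β : Type} (adj : List (Int × List Int)) (g : Int → β) :
    ∀ (ns : List Int) (vis : PySem.Set Int) (acc : List β),
    (∀ v ∈ ns, v ∈ pvUniv adj) →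
    pvUnseen adj (ns.foldl (fun st v => if PySem.Set.contains st.1 v then st
        else (PySem.Set.add st.1 v, st.2 ++ [g v])) (vis, acc)).1
      + (ns.foldl (fun st v => if PySem.Set.contains st.1 v then st
        else (PySem.Set.add st.1 v, st.2 ++ [g v])) (vis, acc)).2.length
      ≤ pvUnseen adj vis + acc.length := by
  intro ns
  induction ns with
  | nil => intro vis acc _; simp
  | cons v ns ih =>
    intro vis acc hsub
    simp only [List.foldl_cons]
    by_cases hc : PySem.Set.contains vis v = true
    · rw [if_pos hc]
      exact ih vis acc (fun w hw => hsub w (List.mem_cons_of_mem _ hw))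
    · rw [if_neg hc]
      have hadd : PySem.Set.add vis v = vis ++ [v] := by
        simp only [PySem.Set.add, hc, Bool.false_eq_true, not_false_eq_true, if_neg]
      have hlt : pvUnseen adj (vis ++ [v]) < pvUnseen adj vis :=
        pvUnseen_add_lt adj vis v (hsub v (List.mem_cons_self ..))
          (by simpa [PySem.Set.contains] using hc)
      have := ih (PySem.Set.add vis v) (acc ++ [g v])
        (fun w hw => hsub w (List.mem_cons_of_mem _ hw))
      simp only [hadd, List.length_append, List.length_singleton] at this ⊢
      omega

theorem pvFold_boundB (adj : List (Int × List Int)) (ns : List Int)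
    (vis : PySem.Set Int) (acc : List Int) (hsub : ∀ v ∈ ns, v ∈ pvUniv adj) :
    pvUnseen adj (ns.foldl (fun st v => if PySem.Set.contains st.1 v then st
        else (PySem.Set.add st.1 v, st.2 ++ [v])) (vis, acc)).1
      + (ns.foldl (fun st v => if PySem.Set.contains st.1 v then st
        else (PySem.Set.add st.1 v, st.2 ++ [v])) (vis, acc)).2.length
      ≤ pvUnseen adj vis + acc.length := by
  simpa using pvFold_bound adj (fun v => v) ns vis acc hsub

-- Bound for the whole-frontier expansion fold.
theorem pvStep_bound (adj : List (Int × List Int)) :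
    ∀ (f : List Int) (vis : PySem.Set Int) (acc : List Int),
    pvUnseen adj (f.foldl (fun st u => (PySem.Dict.getD ⟨adj⟩ u []).foldl
        (fun st v => if PySem.Set.contains st.1 v then st
          else (PySem.Set.add st.1 v, st.2 ++ [v])) st) (vis, acc)).1
      + (f.foldl (fun st u => (PySem.Dict.getD ⟨adj⟩ u []).foldl
        (fun st v => if PySem.Set.contains st.1 v then st
          else (PySem.Set.add st.1 v, st.2 ++ [v])) st) (vis, acc)).2.length
      ≤ pvUnseen adj vis + acc.length := by
  intro f
  induction f with
  | nil => intro vis acc; simp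
  | cons u f ih =>
    intro vis acc
    simp only [List.foldl_cons]
    have h1 := pvFold_boundB adj (PySem.Dict.getD ⟨adj⟩ u []) vis acc
      (pvGetD_subset_univ adj u)
    have h2 := ih ((PySem.Dict.getD ⟨adj⟩ u []).foldl
        (fun st v => if PySem.Set.contains st.1 v then st
          else (PySem.Set.add st.1 v, st.2 ++ [v])) (vis, acc)).1
      ((PySem.Dict.getD ⟨adj⟩ u []).foldl
        (fun st v => if PySem.Set.contains st.1 v then st
          else (PySem.Set.add st.1 v, st.2 ++ [v])) (vis, acc)).2
    simp only [Prod.mk.eta] at h2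
    omega

theorem pvExpand_bound (adj : List (Int × List Int)) (frontier : List Int)
    (visited : PySem.Set Int) :
    pvUnseen adj (pvLevelExpand adj frontier visited).1
      + (pvLevelExpand adj frontier visited).2.length
      ≤ pvUnseen adj visited := by
  have := pvStep_bound adj frontier visited []
  simpa [pvLevelExpand] using this

-- ===== PART 1: A's queue loop equals the level loop =====

-- Once an entry of distance k is popped, every remaining entry has distance k and A only drains.
theorem drain_lemma (adj : List (Int × List Int)) (k : Int) :
    ∀ (q : List (Int × Int)) (fuel : Nat) (vis : PySem.Set Int),
    (∀ p ∈ q, p.2 = k) → q.length < fuel →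
    bfs_k_hop_from_set_loop adj k fuel q vis = PySem.List.sorted vis (fun x => x) false := by
  intro q
  induction q with
  | nil =>
    intro fuel vis _ hfuel
    obtain ⟨m, rfl⟩ : ∃ m, fuel = m + 1 := ⟨fuel - 1, by omega⟩
    rw [bfs_k_hop_from_set_loop]
  | cons p rest ih =>
    intro fuel vis hall hfuel
    obtain ⟨m, rfl⟩ : ∃ m, fuel = m + 1 := ⟨fuel - 1, by omega⟩
    obtain ⟨u, d⟩ := p
    have hd : d = k := hall (u, d) (List.mem_cons_self ..)
    rw [bfs_k_hop_from_set_loop, if_pos hd]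
    exact ih m vis (fun p hp => hall p (List.mem_cons_of_mem _ hp))
      (by simpa using Nat.lt_of_succ_lt_succ hfuel)

-- A's inner neighbour fold (payload (v, d+1), appended after a fixed queue prefix)
-- is the level loop's inner neighbour fold (payload v) with the payloads re-tagged.
theorem inner_rel (d : Int) (ns : List Int) :
    ∀ (vis : PySem.Set Int) (pref : List (Int × Int)) (acc : List Int),
    ns.foldl (fun st v => if PySem.Set.contains st.1 v then st
        else (PySem.Set.add st.1 v, st.2 ++ [(v, d + 1)]))
      (vis, pref ++ acc.map (fun x => (x, d + 1)))
    = ((ns.foldl (fun st v => if PySem.Set.contains st.1 v then st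
        else (PySem.Set.add st.1 v, st.2 ++ [v])) (vis, acc)).1,
       pref ++ ((ns.foldl (fun st v => if PySem.Set.contains st.1 v then st
        else (PySem.Set.add st.1 v, st.2 ++ [v])) (vis, acc)).2).map (fun x => (x, d + 1))) := by
  induction ns with
  | nil => intro vis pref acc; simp
  | cons v ns ih =>
    intro vis pref acc
    simp only [List.foldl_cons]
    by_cases hc : PySem.Set.contains vis v = true
    · rw [if_pos hc, if_pos hc]
      exact ih vis pref acc
    · rw [if_neg hc, if_neg hc]
      have := ih (PySem.Set.add vis v) pref (acc ++ [v])
      simpa [List.append_assoc] using this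

-- Processing one whole level of A's queue (consuming exactly one fuel per popped entry)
-- equals the level loop's frontier-expansion fold.
theorem level_rel (adj : List (Int × List Int)) (k d : Int) (hd : ¬ d = k) :
    ∀ (f : List Int) (m : Nat) (vis : PySem.Set Int) (acc : List Int),
    bfs_k_hop_from_set_loop adj k (m + f.length)
        (f.map (fun x => (x, d)) ++ acc.map (fun x => (x, d + 1))) vis
    = bfs_k_hop_from_set_loop adj k m
        (((f.foldl (fun st u => (PySem.Dict.getD ⟨adj⟩ u []).foldl
            (fun st v => if PySem.Set.contains st.1 v then st
              else (PySem.Set.add st.1 v, st.2 ++ [v])) st) (vis, acc)).2).map (fun x => (x, d + 1)))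
        ((f.foldl (fun st u => (PySem.Dict.getD ⟨adj⟩ u []).foldl
            (fun st v => if PySem.Set.contains st.1 v then st
              else (PySem.Set.add st.1 v, st.2 ++ [v])) st) (vis, acc)).1) := by
  intro f
  induction f with
  | nil => intro m vis acc; simp
  | cons u f ih =>
    intro m vis acc
    simp only [List.map_cons, List.cons_append, List.foldl_cons, List.length_cons]
    have hm : m + (f.length + 1) = (m + f.length) + 1 := by omega
    rw [hm, bfs_k_hop_from_set_loop, if_neg hd]
    have hrel := inner_rel d (PySem.Dict.getD ⟨adj⟩ u []) vis (f.map (fun x => (x, d))) acc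
    simp only [hrel]
    exact ih m _ _

-- A's loop and the level loop agree whenever each starts with fuel above the measure
-- (unseen neighbours + frontier length), by strong induction on the measure bound.
theorem main_rel (adj : List (Int × List Int)) (k : Int) :
    ∀ (n fA fB : Nat) (f : List Int) (vis : PySem.Set Int) (d : Int),
    pvUnseen adj vis + f.length < fA → pvUnseen adj vis + f.length < fB →
    pvUnseen adj vis + f.length ≤ n →
    bfs_k_hop_from_set_loop adj k fA (f.map (fun x => (x, d))) vis
      = pvLevelLoop adj k fB f vis d := by
  intro n
  induction n using Nat.strong_induction_on with
  | _ n ih =>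
    intro fA fB f vis d hA hB hn
    obtain ⟨mB, rfl⟩ : ∃ m, fB = m + 1 := ⟨fB - 1, by omega⟩
    rw [pvLevelLoop]
    by_cases h : f = [] ∨ d = k
    · rw [if_pos h]
      rcases h with h | h
      · subst h
        obtain ⟨mA, rfl⟩ : ∃ m, fA = m + 1 := ⟨fA - 1, by omega⟩
        simp only [List.map_nil]
        rw [bfs_k_hop_from_set_loop]
      · subst h
        exact drain_lemma adj d _ fA vis (by
          intro p hp
          simp only [List.mem_map] at hp
          obtain ⟨a, _, rfl⟩ := hp
          rfl) (by simp only [List.length_map]; omega)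
    · rw [if_neg h]
      rw [not_or] at h
      have hlen : 0 < f.length := List.length_pos_of_ne_nil h.1
      have hfa : fA = (fA - f.length) + f.length := by omega
      rw [hfa]
      have hstep := level_rel adj k d h.2 f (fA - f.length) vis []
      simp only [List.map_nil, List.append_nil] at hstep
      have hexp : pvLevelExpand adj f vis
          = f.foldl (fun st u => (PySem.Dict.getD ⟨adj⟩ u []).foldl
            (fun st v => if PySem.Set.contains st.1 v then st
              else (PySem.Set.add st.1 v, st.2 ++ [v])) st) (vis, ([] : List Int)) := rfl
      rw [hstep, ← hexp]
      have hb := pvExpand_bound adj f vis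
      exact ih (n - 1) (by omega) _ _ _ _ (d + 1) (by omega) (by omega) (by omega)

-- ===== PART 2: the level loop equals B's fixpoint loop =====

-- Membership of the inner neighbour fold's two components.
theorem inner_mem (ns : List Int) :
    ∀ (vis : PySem.Set Int) (acc : List Int) (x : Int),
    (x ∈ (ns.foldl (fun st v => if PySem.Set.contains st.1 v then st
        else (PySem.Set.add st.1 v, st.2 ++ [v])) (vis, acc)).1 ↔ x ∈ vis ∨ x ∈ ns)
    ∧ (x ∈ (ns.foldl (fun st v => if PySem.Set.contains st.1 v then st
        else (PySem.Set.add st.1 v, st.2 ++ [v])) (vis, acc)).2 ↔ x ∈ acc ∨ (x ∉ vis ∧ x ∈ ns)) := by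
  induction ns with
  | nil => intro vis acc x; simp
  | cons v ns ih =>
    intro vis acc x
    simp only [List.foldl_cons]
    by_cases hc : PySem.Set.contains vis v = true
    · rw [if_pos hc]
      have hv : v ∈ vis := (PySem.Set.contains_iff vis v).mp hc
      have := ih vis acc x
      constructor
      · rw [this.1]
        constructor
        · rintro (h | h) <;> simp [h]
        · rintro (h | h)
          · exact Or.inl h
          · rcases List.mem_cons.mp h with rfl | h
            · exact Or.inl hv
            · exact Or.inr h
      · rw [this.2]
        constructor
        · rintro (h | ⟨h1, h2⟩)
          · exact Or.inl h
          · exact Or.inr ⟨h1, List.mem_cons_of_mem _ h2⟩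
        · rintro (h | ⟨h1, h2⟩)
          · exact Or.inl h
          · rcases List.mem_cons.mp h2 with rfl | h2
            · exact absurd hv h1
            · exact Or.inr ⟨h1, h2⟩
    · have hv : v ∉ vis := fun h => hc ((PySem.Set.contains_iff vis v).mpr h)
      have hadd : PySem.Set.add vis v = vis ++ [v] := PySem.Set.add_of_not_mem hv
      rw [if_neg hc, hadd]
      have := ih (vis ++ [v]) (acc ++ [v]) x
      constructor
      · rw [this.1]
        constructor
        · rintro (h | h)
          · rcases List.mem_append.mp h with h | h
            · exact Or.inl h
            · simp only [List.mem_singleton] at h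
              exact Or.inr (by simp [h])
          · exact Or.inr (List.mem_cons_of_mem _ h)
        · rintro (h | h)
          · exact Or.inl (List.mem_append.mpr (Or.inl h))
          · rcases List.mem_cons.mp h with rfl | h
            · exact Or.inl (by simp)
            · exact Or.inr h
      · rw [this.2]
        constructor
        · rintro (h | ⟨h1, h2⟩)
          · rcases List.mem_append.mp h with h | h
            · exact Or.inl h
            · simp only [List.mem_singleton] at h
              subst h
              exact Or.inr ⟨hv, by simp⟩
          · refine Or.inr ⟨fun hx => h1 (List.mem_append.mpr (Or.inl hx)), List.mem_cons_of_mem _ h2⟩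
        · rintro (h | ⟨h1, h2⟩)
          · exact Or.inl (List.mem_append.mpr (Or.inl h))
          · rcases List.mem_cons.mp h2 with rfl | h2
            · exact Or.inl (by simp)
            · by_cases hxv : x = v
              · exact Or.inl (by simp [hxv])
              · refine Or.inr ⟨fun hx => ?_, h2⟩
                rcases List.mem_append.mp hx with h | h
                · exact h1 h
                · simp only [List.mem_singleton] at h; exact hxv h
    
-- The inner fold preserves Nodup of the visited component.
theorem inner_nodup (ns : List Int) :
    ∀ (vis : PySem.Set Int) (acc : List Int), vis.Nodup →
    (ns.foldl (fun st v => if PySem.Set.contains st.1 v then st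
        else (PySem.Set.add st.1 v, st.2 ++ [v])) (vis, acc)).1.Nodup := by
  induction ns with
  | nil => intro vis acc h; exact h
  | cons v ns ih =>
    intro vis acc h
    simp only [List.foldl_cons]
    by_cases hc : PySem.Set.contains vis v = true
    · rw [if_pos hc]; exact ih vis acc h
    · rw [if_neg hc]; exact ih _ _ (PySem.Set.nodup_add _ _ h)

-- Membership and Nodup of the whole level expansion.
theorem expand_mem (adj : List (Int × List Int)) :
    ∀ (f : List Int) (vis : PySem.Set Int) (acc : List Int) (x : Int),
    (x ∈ (f.foldl (fun st u => (PySem.Dict.getD ⟨adj⟩ u []).foldl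
        (fun st v => if PySem.Set.contains st.1 v then st
          else (PySem.Set.add st.1 v, st.2 ++ [v])) st) (vis, acc)).1
      ↔ x ∈ vis ∨ ∃ u ∈ f, x ∈ PySem.Dict.getD ⟨adj⟩ u [])
    ∧ (x ∈ (f.foldl (fun st u => (PySem.Dict.getD ⟨adj⟩ u []).foldl
        (fun st v => if PySem.Set.contains st.1 v then st
          else (PySem.Set.add st.1 v, st.2 ++ [v])) st) (vis, acc)).2
      ↔ x ∈ acc ∨ (x ∉ vis ∧ ∃ u ∈ f, x ∈ PySem.Dict.getD ⟨adj⟩ u [])) := by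
  intro f
  induction f with
  | nil => intro vis acc x; simp
  | cons u f ih =>
    intro vis acc x
    simp only [List.foldl_cons]
    set st1 := (PySem.Dict.getD ⟨adj⟩ u []).foldl
        (fun st v => if PySem.Set.contains st.1 v then st
          else (PySem.Set.add st.1 v, st.2 ++ [v])) (vis, acc) with hst1
    have hin := inner_mem (PySem.Dict.getD ⟨adj⟩ u []) vis acc x
    have hrec := ih st1.1 st1.2 x
    rw [Prod.mk.eta] at hrec
    constructor
    · rw [hrec.1, hin.1]
      constructor
      · rintro ((h | h) | ⟨w, hw, hx⟩)
        · exact Or.inl h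
        · exact Or.inr ⟨u, List.mem_cons_self .., h⟩
        · exact Or.inr ⟨w, List.mem_cons_of_mem _ hw, hx⟩
      · rintro (h | ⟨w, hw, hx⟩)
        · exact Or.inl (Or.inl h)
        · rcases List.mem_cons.mp hw with rfl | hw
          · exact Or.inl (Or.inr hx)
          · exact Or.inr ⟨w, hw, hx⟩
    · rw [hrec.2, hin.2, hin.1]
      constructor
      · rintro ((h | ⟨h1, h2⟩) | ⟨h1, w, hw, hx⟩)
        · exact Or.inl h
        · exact Or.inr ⟨h1, u, List.mem_cons_self .., h2⟩
        · exact Or.inr ⟨fun hv => h1 (Or.inl hv), w, List.mem_cons_of_mem _ hw, hx⟩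
      · rintro (h | ⟨h1, w, hw, hx⟩)
        · exact Or.inl (Or.inl h)
        · rcases List.mem_cons.mp hw with rfl | hw
          · exact Or.inl (Or.inr ⟨h1, hx⟩)
          · by_cases hu : x ∈ PySem.Dict.getD ⟨adj⟩ u []
            · exact Or.inl (Or.inr ⟨h1, hu⟩)
            · exact Or.inr ⟨fun h => (by rcases h with h | h; exact h1 h; exact hu h), w, hw, hx⟩

theorem expand_nodup (adj : List (Int × List Int)) :
    ∀ (f : List Int) (vis : PySem.Set Int) (acc : List Int), vis.Nodup →
    (f.foldl (fun st u => (PySem.Dict.getD ⟨adj⟩ u []).foldl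
        (fun st v => if PySem.Set.contains st.1 v then st
          else (PySem.Set.add st.1 v, st.2 ++ [v])) st) (vis, acc)).1.Nodup := by
  intro f
  induction f with
  | nil => intro vis acc h; exact h
  | cons u f ih =>
    intro vis acc h
    simp only [List.foldl_cons]
    have h1 := inner_nodup (PySem.Dict.getD ⟨adj⟩ u []) vis acc h
    have := ih ((PySem.Dict.getD ⟨adj⟩ u []).foldl
        (fun st v => if PySem.Set.contains st.1 v then st
          else (PySem.Set.add st.1 v, st.2 ++ [v])) (vis, acc)).1
      ((PySem.Dict.getD ⟨adj⟩ u []).foldl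
        (fun st v => if PySem.Set.contains st.1 v then st
          else (PySem.Set.add st.1 v, st.2 ++ [v])) (vis, acc)).2 h1
    simpa using this

-- Membership of B's one-round closure.
theorem close_mem (adj : List (Int × List Int)) (reach : PySem.Set Int) (x : Int) :
    x ∈ bfs_k_hop_from_set_alt_close adj reach
      ↔ x ∈ reach ∨ ∃ u ∈ reach, x ∈ PySem.Dict.getD ⟨adj⟩ u [] := by
  unfold bfs_k_hop_from_set_alt_close
  rw [PySem.Set.mem_union]
  simp [List.mem_flatMap]

-- Two Nodup lists with the same members sort identically.
theorem sorted_congr (a b : List Int) (ha : a.Nodup) (hb : b.Nodup)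
    (h : ∀ x, x ∈ a ↔ x ∈ b) :
    PySem.List.sorted a (fun x => x) false = PySem.List.sorted b (fun x => x) false := by
  apply PySem.List.sorted_eq_sorted_of_perm a b (fun x => x) (fun _ _ h => h)
  exact (List.perm_ext_iff_of_nodup ha hb).mpr h

-- The bridge: the level loop (frontier f, visited vis) and B's fixpoint loop (reach),
-- related by "reach and vis have the same members, f ⊆ vis, and every visited node
-- outside the frontier already has all its neighbours visited", compute the same output.
theorem bridge_rel (adj : List (Int × List Int)) (k : Int) :
    ∀ (n fL fB : Nat) (f : List Int) (vis reach : PySem.Set Int) (d : Int),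
    vis.Nodup → reach.Nodup →
    (∀ x, x ∈ reach ↔ x ∈ vis) →
    (∀ u ∈ f, u ∈ vis) →
    (∀ u ∈ vis, u ∉ f → ∀ v ∈ PySem.Dict.getD ⟨adj⟩ u [], v ∈ vis) →
    pvUnseen adj vis + f.length < fL → pvUnseen adj vis < fB →
    pvUnseen adj vis + f.length ≤ n →
    pvLevelLoop adj k fL f vis d = bfs_k_hop_from_set_alt_loop adj k fB reach d := by
  intro n
  induction n using Nat.strong_induction_on with
  | _ n ih =>
    intro fL fB f vis reach d hndV hndR hmem hfsub hinv hfL hfB hn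
    obtain ⟨mL, rfl⟩ : ∃ m, fL = m + 1 := ⟨fL - 1, by omega⟩
    obtain ⟨mB, rfl⟩ : ∃ m, fB = m + 1 := ⟨fB - 1, by omega⟩
    have hsortRV : PySem.List.sorted reach (fun x => x) false
        = PySem.List.sorted vis (fun x => x) false := sorted_congr _ _ hndR hndV hmem
    rw [pvLevelLoop, bfs_k_hop_from_set_alt_loop]
    by_cases hd : d = k
    · rw [if_pos hd, if_pos (Or.inr hd)]
      exact hsortRV.symm
    · rw [if_neg hd]
      -- characterize B's closure
      set nw := bfs_k_hop_from_set_alt_close adj reach with hnw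
      have hnwmem : ∀ x, x ∈ nw ↔ x ∈ vis ∨ ∃ u ∈ vis, x ∈ PySem.Dict.getD ⟨adj⟩ u [] := by
        intro x
        rw [hnw, close_mem]
        constructor
        · rintro (h | ⟨u, hu, hx⟩)
          · exact Or.inl ((hmem x).mp h)
          · exact Or.inr ⟨u, (hmem u).mp hu, hx⟩
        · rintro (h | ⟨u, hu, hx⟩)
          · exact Or.inl ((hmem x).mpr h)
          · exact Or.inr ⟨u, (hmem u).mpr hu, hx⟩
      by_cases heq : PySem.Set.equal nw reach = true
      · rw [if_pos heq]
        -- the set is closed: every neighbour of vis is in vis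
        have hclosed : ∀ u ∈ vis, ∀ v ∈ PySem.Dict.getD ⟨adj⟩ u [], v ∈ vis := by
          intro u hu v hv
          have : v ∈ nw := (hnwmem v).mpr (Or.inr ⟨u, hu, hv⟩)
          exact (hmem v).mp ((PySem.Set.equal_iff nw reach).mp heq v |>.mp this)
        by_cases hf : f = []
        · rw [if_pos (Or.inl hf)]
          exact hsortRV.symm
        · rw [if_neg (by simp [hf, hd])]
          -- expansion adds nothing; the next frontier is empty
          set st := pvLevelExpand adj f vis with hst
          have hstm := fun x => expand_mem adj f vis [] x
          have hst1mem : ∀ x, x ∈ st.1 ↔ x ∈ vis := by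
            intro x
            rw [hst, pvLevelExpand]
            rw [(hstm x).1]
            constructor
            · rintro (h | ⟨u, hu, hx⟩)
              · exact h
              · exact hclosed u (hfsub u hu) x hx
            · exact Or.inl
          have hst2nil : st.2 = [] := by
            rw [List.eq_nil_iff_forall_not_mem]
            intro x hx
            rw [hst, pvLevelExpand] at hx
            have := (hstm x).2.mp hx
            rcases this with h | ⟨h1, u, hu, hx'⟩
            · simp at h
            · exact h1 (hclosed u (hfsub u hu) x hx')
          -- one more level step on an empty frontier returns sorted st.1
          obtain ⟨mL', rfl⟩ : ∃ m, mL = m + 1 := by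
            have : 1 ≤ f.length := List.length_pos_of_ne_nil hf
            exact ⟨mL - 1, by omega⟩
          show pvLevelLoop adj k (mL' + 1) st.2 st.1 (d + 1)
              = PySem.List.sorted reach (fun x => x) false
          rw [hst2nil, pvLevelLoop, if_pos (Or.inl rfl)]
          have hndst : st.1.Nodup := by
            rw [hst, pvLevelExpand]; exact expand_nodup adj f vis [] hndV
          calc PySem.List.sorted st.1 (fun x => x) false
              = PySem.List.sorted vis (fun x => x) false :=
                sorted_congr _ _ hndst hndV hst1mem
            _ = PySem.List.sorted reach (fun x => x) false := hsortRV.symm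
      · rw [if_neg heq]
        -- the closure grew: some new node was reached, and the frontier is nonempty
        have hsubnw : ∀ x ∈ reach, x ∈ nw := by
          intro x hx
          rw [hnw, close_mem]
          exact Or.inl hx
        have hgrow : ∃ w, w ∈ nw ∧ w ∉ reach := by
          by_contra hno
          push Not at hno
          exact heq ((PySem.Set.equal_iff nw reach).mpr
            (fun x => ⟨fun hx => hno x hx, hsubnw x⟩))
        obtain ⟨w, hwnw, hwr⟩ := hgrow
        have hwU : w ∈ pvUniv adj := by
          have := (hnwmem w).mp hwnw
          rcases this with h | ⟨u, _, hx⟩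
          · exact absurd ((hmem w).mpr h) hwr
          · exact pvGetD_subset_univ adj u w hx
        have hwvis : w ∉ vis := fun h => hwr ((hmem w).mpr h)
        have hwN : ∃ u ∈ vis, w ∈ PySem.Dict.getD ⟨adj⟩ u [] := by
          rcases (hnwmem w).mp hwnw with h | h
          · exact absurd h hwvis
          · exact h
        have hf : f ≠ [] := by
          rintro rfl
          obtain ⟨u, hu, hw⟩ := hwN
          exact hwvis (hinv u hu (by simp) w hw)
        rw [if_neg (by simp [hf, hd])]
        -- relate the recursive states
        set st := pvLevelExpand adj f vis with hst
        have hstm := fun x => expand_mem adj f vis [] x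
        have hst1mem : ∀ x, x ∈ st.1 ↔ x ∈ vis ∨ ∃ u ∈ f, x ∈ PySem.Dict.getD ⟨adj⟩ u [] := by
          intro x; rw [hst, pvLevelExpand]; exact (hstm x).1
        have hst2mem : ∀ x, x ∈ st.2 ↔ x ∉ vis ∧ ∃ u ∈ f, x ∈ PySem.Dict.getD ⟨adj⟩ u [] := by
          intro x
          rw [hst, pvLevelExpand, (hstm x).2]
          simp
        have hndst : st.1.Nodup := by
          rw [hst, pvLevelExpand]; exact expand_nodup adj f vis [] hndV
        have hndnw : nw.Nodup := by
          rw [hnw]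
          exact PySem.Set.nodup_union _ _ hndR
        -- nw and st.1 have the same members
        have hmem' : ∀ x, x ∈ nw ↔ x ∈ st.1 := by
          intro x
          rw [hnwmem, hst1mem]
          constructor
          · rintro (h | ⟨u, hu, hx⟩)
            · exact Or.inl h
            · by_cases huf : u ∈ f
              · exact Or.inr ⟨u, huf, hx⟩
              · exact Or.inl (hinv u hu huf x hx)
          · rintro (h | ⟨u, hu, hx⟩)
            · exact Or.inl h
            · exact Or.inr ⟨u, hfsub u hu, hx⟩
        -- frontier ⊆ new visited
        have hfsub' : ∀ u ∈ st.2, u ∈ st.1 := by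
          intro u hu
          have := (hst2mem u).mp hu
          exact (hst1mem u).mpr (Or.inr this.2)
        -- invariant preserved
        have hinv' : ∀ u ∈ st.1, u ∉ st.2 → ∀ v ∈ PySem.Dict.getD ⟨adj⟩ u [], v ∈ st.1 := by
          intro u hu hnf v hv
          by_cases huv : u ∈ vis
          · by_cases huf : u ∈ f
            · exact (hst1mem v).mpr (Or.inr ⟨u, huf, hv⟩)
            · exact (hst1mem v).mpr (Or.inl (hinv u huv huf v hv))
          · exfalso
            rcases (hst1mem u).mp hu with h | h
            · exact huv h
            · exact hnf ((hst2mem u).mpr ⟨huv, h⟩)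
        -- measures
        have hbound := pvExpand_bound adj f vis
        rw [← hst] at hbound
        have hUst : pvUnseen adj st.1 = pvUnseen adj nw :=
          pvUnseen_congr adj st.1 nw (fun x => (hmem' x).symm)
        have hUr : pvUnseen adj reach = pvUnseen adj vis :=
          pvUnseen_congr adj reach vis hmem
        have hUdec : pvUnseen adj nw < pvUnseen adj reach :=
          pvUnseen_lt_of_ssub adj reach nw hsubnw w hwU hwnw hwr
        have hflen : 1 ≤ f.length := List.length_pos_of_ne_nil hf
        exact ih (n - 1) (by omega) mL mB st.2 st.1 nw (d + 1)
          hndst hndnw hmem' hfsub' hinv'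
          (by omega) (by omega) (by omega)

-- ===== VERDICT (by name: the statement is the Claim_ definition above) =====
theorem bfs_k_hop_from_set_spec : Claim_equal_bfs_k_hop_from_set := by
  intro adj sources k _
  unfold Spec_bfs_k_hop_from_set bfs_k_hop_from_set bfs_k_hop_from_set_alt
  have hle := pvUnseen_le_univ adj (PySem.Set.ofList sources)
  have hulen : (pvUniv adj).length = (adj.flatMap (fun p => p.2)).length := rfl
  have h1 : bfs_k_hop_from_set_loop adj k ((adj.flatMap (fun p => p.2)).length + sources.length + 1)
      (sources.map (fun s => (s, 0))) (PySem.Set.ofList sources)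
      = pvLevelLoop adj k (pvUnseen adj (PySem.Set.ofList sources) + sources.length + 1)
        sources (PySem.Set.ofList sources) 0 :=
    main_rel adj k (pvUnseen adj (PySem.Set.ofList sources) + sources.length) _ _
      sources (PySem.Set.ofList sources) 0 (by omega) (by omega) le_rfl
  rw [h1]
  exact bridge_rel adj k (pvUnseen adj (PySem.Set.ofList sources) + sources.length) _ _
    sources (PySem.Set.ofList sources) (PySem.Set.ofList sources) 0
    (PySem.Set.nodup_ofList sources) (PySem.Set.nodup_ofList sources)
    (fun _ => Iff.rfl)
    (fun u hu => by simpa [PySem.Set.mem_ofList] using hu)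
    (fun u hu hnf => absurd (by simpa [PySem.Set.mem_ofList] using hu : u ∈ sources) hnf)
    (by omega) (by omega) le_rfl
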